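-- pv_equiv track=rewrite | github.com/pypi-data/pypi-mirror-6 | packages/verman/verman-1.1.tar.gz/verman-1.1/verman/__init__.py | _is_valid_git_refname
-- ===== SOURCE A (Python) =====
-- def _is_valid_git_refname(refname):
--     """check if a string is a valid branch-name/ref-name for git
--
--     Input:
--     refname: string to validate
--
--     Output:
--     True if 'refname' is a valid branch name in git. False if it fails to
--     meet any of the criteria described in the man page for
--     'git check-ref-format', also see:
--
--     http://www.kernel.org/pub/software/scm/git/docs/git-check-ref-format.html
--
--     This code was adapted from QIIME. The author, Yoshiki Vazquez Baeza has
--     given explicit permission for this code to be licensed under BSD. The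
--     discussion can be found here https://github.com/wasade/verman/issues/1
--     """
--     if len(refname) == 0:
--         return False
--
--     # git imposes a few requirements to accept a string as a
--     # refname/branch-name
--
--     # They can include slash / for hierarchical (directory) grouping, but no
--     # slash-separated component can begin with a dot . or end with the
--     # sequence .lock
--     if (len([True for element in refname.split('/')
--             if element.startswith('.') or element.endswith('.lock')]) != 0):
--         return False
--
--     # They cannot have two consecutive dots .. anywhere
--     if '..' in refname:
--         return False
--
--     # They cannot have ASCII control characters (i.e. bytes whose values are
--     # lower than \040, or \177 DEL), space, tilde, caret ^, or colon :
--     # anywhere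
--     if len([True for refname_char in refname if ord(refname_char) < 40 or
--             ord(refname_char) == 177]) != 0:
--         return False
--     if ' ' in refname or '~' in refname or '^' in refname or ':' in refname:
--         return False
--
--     # They cannot have question-mark ?, asterisk *, or open bracket [
--     # anywhere
--     if '?' in refname or '*' in refname or '[' in refname:
--         return False
--
--     # They cannot begin or end with a slash / or contain multiple
--     # consecutive slashes
--     if refname.startswith('/') or refname.endswith('/') or '//' in refname:
--         return False
--
--     # They cannot end with a dot ..
--     if refname.endswith('.'):
--         return False
--
--     # They cannot contain a sequence @{
--     if '@{' in refname:
--         return False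
--
--     # They cannot contain a \
--     if '\\' in refname:
--         return False
--
--     return True
-- ===== SOURCE B (Python) =====
-- def _is_valid_git_refname(refname):
--     n = len(refname)
--     if n == 0:
--         return False
--     for i in range(n):
--         c = refname[i]
--         if ord(c) < 40 or ord(c) == 177 or c in ' ~^:?*[\\':
--             return False
--         if i == 0:
--             if c == '.' or c == '/':
--                 return False
--         elif refname[i - 1:i + 1] in ('..', '//', '@{', '/.'):
--             return False
--         if i == n - 1 and (c == '.' or c == '/'):
--             return False
--         end = i if c == '/' else (n if i == n - 1 else None)
--         if end is not None and end >= 5 and refname[end - 5:end] == '.lock':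
--             return False
--     return True
-- ===== Notes on version B (the rewrite author's own statement) =====
-- stated objective: alternative
-- what changed: A validates with ten staged whole-string scans (a split('/') pass with two per-component string tests, two list-comprehension counting passes, and eight substring-membership scans); B makes a single pass over the character positions applying purely local rules at each index i: a forbidden-character test, a two-character window refname[i-1:i+1] against the forbidden adjacent pairs ('..','//','@{','/.'), boundary rules at i==0 and i==n-1, and a five-character slice comparison against '.lock' exactly at component ends (a '/' or the end of the string) - no split() and no substring searches.
import Mathlib
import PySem

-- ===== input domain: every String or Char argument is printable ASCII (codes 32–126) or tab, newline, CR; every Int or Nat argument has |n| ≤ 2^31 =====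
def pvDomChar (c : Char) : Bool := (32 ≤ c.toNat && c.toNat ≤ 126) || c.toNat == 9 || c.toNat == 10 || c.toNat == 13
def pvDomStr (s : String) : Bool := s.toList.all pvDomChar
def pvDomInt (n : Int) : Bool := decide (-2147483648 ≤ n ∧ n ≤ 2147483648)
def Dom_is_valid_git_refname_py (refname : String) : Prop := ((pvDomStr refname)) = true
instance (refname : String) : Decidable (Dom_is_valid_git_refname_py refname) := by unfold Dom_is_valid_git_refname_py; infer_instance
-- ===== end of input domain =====

-- B replaces A's staged whole-string scans (split('/') + substring searches) by a single
-- pass over the character positions with purely local rules at each index; objective: alternative.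

-- ===== PORT A =====
-- literal transliteration of _is_valid_git_refname (each 'if ...: return False' in order)
def is_valid_git_refname_py (refname : String) : Bool :=
  let cs := refname.toList
  if PySem.Chars.len cs = 0 then false
  -- len([True for element in refname.split('/') if element.startswith('.') or element.endswith('.lock')]) != 0
  else if ((PySem.Chars.splitOn cs ['/']).foldl (fun acc element =>
        if PySem.Chars.startswith element ['.'] || PySem.Chars.endswith element ['.','l','o','c','k']
        then acc ++ [true] else acc) []).length ≠ 0 then false
  else if PySem.Chars.isIn ['.','.'] cs then false
  -- len([True for refname_char in refname if ord(refname_char) < 40 or ord(refname_char) == 177]) != 0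
  else if (cs.foldl (fun acc refname_char =>
        if refname_char.toNat < 40 || refname_char.toNat == 177
        then acc ++ [true] else acc) []).length ≠ 0 then false
  else if PySem.Chars.isIn [' '] cs || PySem.Chars.isIn ['~'] cs
       || PySem.Chars.isIn ['^'] cs || PySem.Chars.isIn [':'] cs then false
  else if PySem.Chars.isIn ['?'] cs || PySem.Chars.isIn ['*'] cs
       || PySem.Chars.isIn ['['] cs then false
  else if PySem.Chars.startswith cs ['/'] || PySem.Chars.endswith cs ['/']
       || PySem.Chars.isIn ['/','/'] cs then false
  else if PySem.Chars.endswith cs ['.'] then false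
  else if PySem.Chars.isIn ['@','{'] cs then false
  else if PySem.Chars.isIn ['\\'] cs then false
  else true

-- ===== PORT B =====
-- the body of B's loop: all rules B checks at index i (returns false iff Python hits a 'return False' at i)
def pvCheckAt (cs : List Char) (n : Int) (i : Int) : Bool :=
  match PySem.List.pyGet? cs i with
  | none => true   -- unreachable: 0 ≤ i < n = len(cs)
  | some c =>
    -- if ord(c) < 40 or ord(c) == 177 or c in ' ~^:?*[\\': return False
    if c.toNat < 40 || c.toNat == 177 || PySem.Chars.isIn [c] (" ~^:?*[\\".toList) then false
    -- if i == 0: / if c == '.' or c == '/': return False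
    else if i == 0 && (c == '.' || c == '/') then false
    -- elif refname[i-1:i+1] in ('..', '//', '@{', '/.'): return False
    else if i != 0 && (PySem.List.slice cs (some (i-1)) (some (i+1)) == ['.','.']
                    || PySem.List.slice cs (some (i-1)) (some (i+1)) == ['/','/']
                    || PySem.List.slice cs (some (i-1)) (some (i+1)) == ['@','{']
                    || PySem.List.slice cs (some (i-1)) (some (i+1)) == ['/','.']) then false
    -- if i == n - 1 and (c == '.' or c == '/'): return False
    else if i == n - 1 && (c == '.' || c == '/') then false
    else
      -- end = i if c == '/' else (n if i == n - 1 else None)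
      let end? : Option Int := if c == '/' then some i else if i == n - 1 then some n else none
      -- if end is not None and end >= 5 and refname[end-5:end] == '.lock': return False
      match end? with
      | none => true
      | some e => !(5 ≤ e && PySem.List.slice cs (some (e-5)) (some e) == ['.','l','o','c','k'])

def is_valid_git_refname_py_alt (refname : String) : Bool :=
  let cs := refname.toList
  let n : Int := PySem.Chars.len cs
  if n = 0 then false
  else (PySem.List.pyRange 0 n 1).all (fun i => pvCheckAt cs n i)

-- ===== PRECONDITION & SPEC =====
def Spec_is_valid_git_refname_py (refname : String) (out : Bool) : Prop := out = is_valid_git_refname_py_alt refname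
instance (refname : String) (out : Bool) : Decidable (Spec_is_valid_git_refname_py refname out) := by unfold Spec_is_valid_git_refname_py; infer_instance

-- ===== CLAIM (what is proved, stated in full; the proofs are below) =====
def Claim_equal_is_valid_git_refname_py : Prop := ∀ (refname : String), Dom_is_valid_git_refname_py refname → Spec_is_valid_git_refname_py refname (is_valid_git_refname_py refname)

-- ===== LEMMAS AND PROOFS =====

-- the common normal form both validators are reduced to
def pvC (cs : List Char) : Prop :=
  (∀ c ∈ cs, ¬(c.toNat < 40 ∨ c.toNat = 177 ∨ c ∈ ([' ','~','^',':','?','*','[','\\'] : List Char)))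
  ∧ cs.head? ≠ some '.' ∧ cs.head? ≠ some '/'
  ∧ cs.getLast? ≠ some '.' ∧ cs.getLast? ≠ some '/'
  ∧ ('.','.') ∉ cs.zip cs.tail ∧ ('/','/') ∉ cs.zip cs.tail
  ∧ ('@','{') ∉ cs.zip cs.tail ∧ ('/','.') ∉ cs.zip cs.tail
  ∧ ¬(∃ j, ['.','l','o','c','k','/'] <+: cs.drop j)
  ∧ ¬(['.','l','o','c','k'] <:+ cs)

def pvSplit (sep : Char) : List Char → List (List Char)
  | [] => [[]]
  | c :: s => if c = sep then [] :: pvSplit sep s else (pvSplit sep s).modifyHead (c :: ·)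

lemma head_pvSplit (sep : Char) (s : List Char) :
    ∃ t, pvSplit sep s = (s.takeWhile (· ≠ sep)) :: t := by
  induction s with
  | nil => exact ⟨[], rfl⟩
  | cons c s ih =>
    obtain ⟨t, ht⟩ := ih
    by_cases h : c = sep
    · exact ⟨pvSplit sep s, by simp [pvSplit, h]⟩
    · exact ⟨t, by simp [pvSplit, h, ht, List.modifyHead]⟩

lemma existsDrop_cons (q : List Char) (c : Char) (s : List Char) :
    (∃ j, q <+: (c :: s).drop j) ↔ q <+: (c :: s) ∨ (∃ j, q <+: s.drop j) := by
  constructor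
  · rintro ⟨j, hj⟩
    cases j with
    | zero => exact Or.inl hj
    | succ j => exact Or.inr ⟨j, hj⟩
  · rintro (h | ⟨j, hj⟩)
    · exact ⟨0, h⟩
    · exact ⟨j + 1, hj⟩

lemma key_eq (p : List Char) (hp : p ≠ []) (hsl : '/' ∉ p) (c : Char) (s : List Char) :
    (p = c :: s.takeWhile (· ≠ '/')) ↔ ((p ++ ['/'] <+: c :: s) ∨ p = c :: s) := by
  constructor
  · intro h
    have hs := (List.takeWhile_append_dropWhile (p := fun x => decide (x ≠ '/')) (l := s)).symm
    rcases hd : s.dropWhile (fun x => decide (x ≠ '/')) with _ | ⟨d, r⟩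
    · rw [hd, List.append_nil] at hs
      exact Or.inr (by rw [h]; exact congrArg _ hs.symm)
    · have hdhead : d = '/' := by
        have := List.head_dropWhile_not (p := fun x => decide (x ≠ '/')) (l := s)
        rw [hd] at this
        simpa using this (by simp)
      refine Or.inl ⟨r, ?_⟩
      rw [h]
      conv_rhs => rw [hs, hd, hdhead]
      simp
  · rintro (⟨r, hr⟩ | h)
    · rcases p with _ | ⟨ph, pt⟩
      · exact absurd rfl hp
      · rw [List.cons_append, List.cons_append] at hr
        have h1 : ph = c := (List.cons.injEq _ _ _ _ ▸ hr).1
        have h2 : s = pt ++ '/' :: r := by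
          have := (List.cons.injEq _ _ _ _ ▸ hr).2
          rw [← this, List.append_assoc]; rfl
        have hpt : ∀ x ∈ pt, (fun x => decide (x ≠ '/')) x = true := by
          intro x hx
          simp only [decide_eq_true_eq, ne_eq]
          exact fun hh => hsl (by rw [hh] at hx; exact List.mem_cons_of_mem _ hx)
        rw [h2, List.takeWhile_append_of_pos hpt]
        simp [h1]
    · have hns : '/' ∉ s := fun hh => hsl (by rw [h]; exact List.mem_cons_of_mem _ hh)
      rw [List.takeWhile_eq_self_iff.mpr (by
        intro x hx
        simp only [decide_eq_true_eq, ne_eq]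
        exact fun hh => hns (by rw [← hh]; exact hx))]
      exact h

set_option maxHeartbeats 1000000 in
lemma pvSplit_endswith (p : List Char) (hp : p ≠ []) (hsl : '/' ∉ p) (s : List Char) :
    (∃ comp ∈ pvSplit '/' s, p <:+ comp) ↔
      (∃ j, p ++ ['/'] <+: s.drop j) ∨ p <:+ s := by
  induction s with
  | nil =>
    simp only [pvSplit, List.mem_cons, List.not_mem_nil, or_false, List.drop_nil]
    constructor
    · rintro ⟨comp, rfl, hs⟩
      exact absurd (List.suffix_nil.mp hs) hp
    · rintro (⟨j, hj⟩ | hj)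
      · exact absurd (List.prefix_nil.mp hj) (by simp)
      · exact absurd (List.suffix_nil.mp hj) hp
  | cons c s ih =>
    have hph : ∀ r, ¬ (p ++ ['/'] <+: '/' :: r) := by
      rintro r hr
      rcases p with _ | ⟨ph, pt⟩
      · exact hp rfl
      · rw [List.cons_append] at hr
        exact hsl ((List.cons_prefix_cons.mp hr).1 ▸ List.mem_cons_self)
    rw [existsDrop_cons]
    by_cases h : c = '/'
    · subst h
      have htr : pvSplit '/' ('/' :: s) = [] :: pvSplit '/' s := by simp [pvSplit]
      rw [htr, List.exists_mem_cons_iff]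
      have h1 : ¬ (p <:+ ([] : List Char)) := fun hh => hp (List.suffix_nil.mp hh)
      have h3 : (p <:+ '/' :: s) ↔ p <:+ s := by
        rw [List.suffix_cons_iff]
        constructor
        · rintro (hh | hh)
          · exact absurd (hh ▸ List.mem_cons_self) hsl
          · exact hh
        · exact Or.inr
      rw [ih, h3]
      have h2 := hph s
      tauto
    · obtain ⟨t, ht⟩ := head_pvSplit '/' s
      have htr : pvSplit '/' (c :: s) = (c :: s.takeWhile (· ≠ '/')) :: t := by
        simp [pvSplit, h, ht, List.modifyHead]
      rw [htr, List.exists_mem_cons_iff, List.suffix_cons_iff]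
      have hih : (p <:+ s.takeWhile (· ≠ '/') ∨ ∃ comp ∈ t, p <:+ comp) ↔
          (∃ j, p ++ ['/'] <+: s.drop j) ∨ p <:+ s := by
        rw [← ih, ht, List.exists_mem_cons_iff]
      have hkey := key_eq p hp hsl c s
      rw [List.suffix_cons_iff (l₂ := s)]
      constructor
      · rintro ((h1 | h2) | h3)
        · rcases hkey.mp h1 with h6 | h7
          · exact Or.inl (Or.inl h6)
          · exact Or.inr (Or.inl h7)
        · rcases hih.mp (Or.inl h2) with h4 | h5
          · exact Or.inl (Or.inr h4)
          · exact Or.inr (Or.inr h5)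
        · rcases hih.mp (Or.inr h3) with h4 | h5
          · exact Or.inl (Or.inr h4)
          · exact Or.inr (Or.inr h5)
      · rintro ((h6 | h4) | (h7 | h5))
        · exact Or.inl (Or.inl (hkey.mpr (Or.inl h6)))
        · rcases hih.mpr (Or.inl h4) with h2 | h3
          · exact Or.inl (Or.inr h2)
          · exact Or.inr h3
        · exact Or.inl (Or.inl (hkey.mpr (Or.inr h7)))
        · rcases hih.mpr (Or.inr h5) with h2 | h3
          · exact Or.inl (Or.inr h2)
          · exact Or.inr h3

lemma modifyHead_fun_id {α : Type} (l : List α) : l.modifyHead (fun x => x) = l := by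
  cases l <;> rfl

lemma pvSplit_ne_nil (sep : Char) (s : List Char) : pvSplit sep s ≠ [] := by
  induction s with
  | nil => simp [pvSplit]
  | cons c s ih =>
    by_cases h : c = sep
    · simp [pvSplit, h]
    · simp only [pvSplit, if_neg h]
      rcases hq : pvSplit sep s with _ | ⟨h', t⟩
      · exact absurd hq ih
      · simp [List.modifyHead]

lemma splitOn_go_eq (sep : Char) (s : List Char) :
    ∀ (fuel : Nat), s.length < fuel → ∀ (cur : List Char) (acc : List (List Char)),
    PySem.Chars.splitOn.go [sep] fuel s cur acc
      = acc.reverse ++ (pvSplit sep s).modifyHead (cur.reverse ++ ·) := by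
  induction s with
  | nil =>
    intro fuel hf cur acc
    cases fuel with
    | zero => omega
    | succ f => simp [PySem.Chars.splitOn.go, pvSplit]
  | cons c s ih =>
    intro fuel hf cur acc
    cases fuel with
    | zero => omega
    | succ f =>
      by_cases h : c = sep
      · have hpre : List.isPrefixOf [sep] (c :: s) = true := by simp [List.isPrefixOf, h]
        rw [PySem.Chars.splitOn.go]
        simp only [hpre, if_pos]
        rw [show List.drop ([sep].length) (c :: s) = s by simp]
        rw [ih f (by simpa using Nat.lt_succ_iff.mp hf) [] (cur.reverse :: acc)]
        simp [pvSplit, h, modifyHead_fun_id]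
      · have hpre : List.isPrefixOf [sep] (c :: s) = false := by
          simp only [List.isPrefixOf, Bool.and_eq_false_iff, beq_eq_false_iff_ne, ne_eq]
          exact Or.inl (fun hh => h hh.symm)
        rw [PySem.Chars.splitOn.go]
        simp only [hpre]
        rw [if_neg (by simp)]
        rw [ih f (by simpa using Nat.lt_succ_iff.mp hf) (c :: cur) acc]
        obtain ⟨t, ht⟩ : ∃ h' t, pvSplit sep s = h' :: t := by
          rcases hq : pvSplit sep s with _ | ⟨h', t⟩
          · exact absurd hq (pvSplit_ne_nil sep s)
          · exact ⟨h', t, rfl⟩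
        obtain ⟨t2, ht2⟩ := ht
        simp [pvSplit, h, ht2, List.modifyHead]

lemma splitOn_eq_pvSplit (sep : Char) (s : List Char) :
    PySem.Chars.splitOn s [sep] = pvSplit sep s := by
  rw [PySem.Chars.splitOn, splitOn_go_eq sep s (s.length + 1) (by omega) [] []]
  simp [modifyHead_fun_id]

lemma zip_tail_cons (a b c : Char) (s : List Char) :
    ((a, b) ∈ (c :: s).zip (c :: s).tail) ↔ (c = a ∧ s.head? = some b) ∨ (a, b) ∈ s.zip s.tail := by
  cases s with
  | nil => simp
  | cons d t => simp [List.zip_cons_cons, Prod.ext_iff, eq_comm]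

lemma dot_prefix_takeWhile (s : List Char) :
    (['.'] <+: s.takeWhile (· ≠ '/')) ↔ s.head? = some '.' := by
  cases s with
  | nil => simp
  | cons c s =>
    by_cases h : c = '/'
    · simp [List.takeWhile_cons, h]
    · simp [List.takeWhile_cons, h, List.cons_prefix_cons, eq_comm]

lemma pvSplit_tail_dot (s : List Char) :
    (∃ comp ∈ (pvSplit '/' s).tail, ['.'] <+: comp) ↔ ('/','.') ∈ s.zip s.tail := by
  induction s with
  | nil => simp [pvSplit]
  | cons c s ih =>
    rw [zip_tail_cons]
    obtain ⟨t, ht⟩ := head_pvSplit '/' s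
    have htail : (pvSplit '/' s).tail = t := by rw [ht]; rfl
    rw [htail] at ih
    by_cases h : c = '/'
    · subst h
      simp only [pvSplit, ht, if_true, List.tail_cons, true_and]
      rw [List.exists_mem_cons_iff, dot_prefix_takeWhile, ih]
    · simp only [pvSplit, if_neg h, ht, List.modifyHead, List.tail_cons]
      rw [ih]
      simp [h]

lemma pvSplit_startswith_dot (s : List Char) :
    (∃ comp ∈ pvSplit '/' s, ['.'] <+: comp) ↔
      s.head? = some '.' ∨ ('/','.') ∈ s.zip s.tail := by
  obtain ⟨t, ht⟩ := head_pvSplit '/' s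
  rw [← pvSplit_tail_dot, ht]
  simp only [List.mem_cons, List.tail_cons]
  constructor
  · rintro ⟨comp, hc | hc, hp⟩
    · exact Or.inl ((dot_prefix_takeWhile s).mp (hc ▸ hp))
    · exact Or.inr ⟨comp, hc, hp⟩
  · rintro (hh | ⟨comp, hc, hp⟩)
    · exact ⟨_, Or.inl rfl, (dot_prefix_takeWhile s).mpr hh⟩
    · exact ⟨comp, Or.inr hc, hp⟩

lemma slice_sub_add (cs : List Char) (k m : Nat) (hm : m ≤ k) :
    PySem.List.slice cs (some ((k:Int) - (m:Int))) (some (k:Int)) = (cs.drop (k - m)).take m := by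
  have h1 : (k:Int) - (m:Int) = ((k - m : Nat) : Int) := by omega
  rw [h1, PySem.List.slice_natCast]
  congr 1
  omega

set_option maxRecDepth 8000 in
lemma checkAt_iff (cs : List Char) (k : Nat) (hk : k < cs.length) :
    pvCheckAt cs (cs.length : Int) (k : Int) = true ↔
      ((¬(cs[k].toNat < 40 ∨ cs[k].toNat = 177 ∨ cs[k] ∈ ([' ','~','^',':','?','*','[','\\'] : List Char)))
      ∧ (k = 0 → ¬(cs[k] = '.' ∨ cs[k] = '/'))
      ∧ (1 ≤ k → ¬((cs.drop (k-1)).take 2 = ['.','.'] ∨ (cs.drop (k-1)).take 2 = ['/','/']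
               ∨ (cs.drop (k-1)).take 2 = ['@','{'] ∨ (cs.drop (k-1)).take 2 = ['/','.']))
      ∧ (k = cs.length - 1 → ¬(cs[k] = '.' ∨ cs[k] = '/'))
      ∧ ((cs[k] = '/' → ¬(5 ≤ k ∧ (cs.drop (k-5)).take 5 = ['.','l','o','c','k']))
      ∧ (cs[k] ≠ '/' → k = cs.length - 1 →
          ¬(5 ≤ cs.length ∧ (cs.drop (cs.length-5)).take 5 = ['.','l','o','c','k'])))) := by
  have hget : PySem.List.pyGet? cs (k : Int) = some cs[k] := by
    rw [PySem.List.pyGet?_natCast, List.getElem?_eq_getElem hk]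
  have hk0 : ((k:Int) = 0) ↔ k = 0 := by omega
  have hklast : ((k:Int) = (cs.length:Int) - 1) ↔ k = cs.length - 1 := by omega
  have hsl2 : 1 ≤ k → PySem.List.slice cs (some ((k:Int)-1)) (some ((k:Int)+1)) = (cs.drop (k-1)).take 2 := by
    intro h1
    rw [show (k:Int) + 1 = ((k+1 : Nat) : Int) by omega, show (k:Int) - 1 = ((k-1:Nat):Int) by omega,
      PySem.List.slice_natCast]
    congr 1
    omega
  have hsl5 : 5 ≤ k → PySem.List.slice cs (some ((k:Int)-5)) (some (k:Int)) = (cs.drop (k-5)).take 5 :=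
    slice_sub_add cs k 5
  have hsl5n : 5 ≤ cs.length → PySem.List.slice cs (some ((cs.length:Int)-5)) (some (cs.length:Int)) = (cs.drop (cs.length-5)).take 5 :=
    slice_sub_add cs cs.length 5
  have hform : ∀ (b1 b2 b3 b4 x : Bool), (if b1 then false else if b2 then false
      else if b3 then false else if b4 then false else x) = (!b1 && (!b2 && (!b3 && (!b4 && x)))) := by
    decide
  simp only [pvCheckAt, hget]
  rw [hform]
  simp only [Bool.and_eq_true, Bool.not_eq_true']
  refine and_congr ?_ (and_congr ?_ (and_congr ?_ (and_congr ?_ ?_)))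
  · simp [PySem.Chars.isIn_eq_false_iff, List.singleton_infix_iff, not_or]
    tauto
  · by_cases h0 : k = 0 <;> simp [h0, not_or]
  · by_cases h0 : k = 0
    · simp [h0]
    · simp [h0, hsl2 (by omega : 1 ≤ k), not_or, Nat.one_le_iff_ne_zero]
      tauto
  · by_cases hl : k = cs.length - 1
    · simp [hklast, eq_true hl, not_or]
    · simp [hklast, hl, not_or]
  · by_cases hc : cs[k] = '/'
    · by_cases h5 : 5 ≤ k
      · simp [hc, hsl5 h5, show ((5:Int) ≤ (k:Int)) ↔ 5 ≤ k from by omega, h5, not_and]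
      · simp [hc, show ¬((5:Int) ≤ (k:Int)) from by omega, h5]
    · by_cases hl : k = cs.length - 1
      · by_cases h5' : 5 ≤ cs.length
        · simp [hc, hklast, eq_true hl, hsl5n h5',
            show ((5:Int) ≤ (cs.length:Int)) ↔ 5 ≤ cs.length from by omega, h5', not_and]
        · simp [hc, hklast, eq_true hl,
            show ¬((5:Int) ≤ (cs.length:Int)) from by omega, h5']
      · simp [hc, hklast, hl]

lemma zip_tail_mem_iff (a b : Char) (cs : List Char) :
    (a, b) ∈ cs.zip cs.tail ↔ ∃ (k : Nat), ∃ _ : k + 1 < cs.length, cs[k] = a ∧ cs[k+1] = b := by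
  rw [List.mem_iff_getElem]
  constructor
  · rintro ⟨k, hk, hke⟩
    have hk' : k + 1 < cs.length := by
      simp [List.length_zip, List.length_tail] at hk
      omega
    refine ⟨k, hk', ?_⟩
    rw [List.getElem_zip] at hke
    have ht : cs.tail[k]'(by simp [List.length_tail]; omega) = cs[k+1] := List.getElem_tail _
    rw [ht] at hke
    exact ⟨congrArg Prod.fst hke, congrArg Prod.snd hke⟩
  · rintro ⟨k, hk, h1, h2⟩
    refine ⟨k, by simp [List.length_zip, List.length_tail]; omega, ?_⟩
    rw [List.getElem_zip]
    have ht : cs.tail[k]'(by simp [List.length_tail]; omega) = cs[k+1] := List.getElem_tail _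
    rw [ht, h1, h2]

lemma take_two_window (cs : List Char) (k : Nat) (hk : k + 1 < cs.length) :
    (cs.drop k).take 2 = [cs[k], cs[k+1]] := by
  rw [List.drop_eq_getElem_cons (by omega), List.drop_eq_getElem_cons hk]
  rfl

lemma lock_suffix_iff (cs : List Char) :
    (['.','l','o','c','k'] <:+ cs) ↔ (5 ≤ cs.length ∧ (cs.drop (cs.length - 5)).take 5 = ['.','l','o','c','k']) := by
  constructor
  · intro hs
    have hlen : 5 ≤ cs.length := by
      have := hs.length_le
      simpa using this
    have hd : cs.drop (cs.length - 5) = ['.','l','o','c','k'] := (List.suffix_iff_eq_drop.mp hs).symm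
    refine ⟨hlen, ?_⟩
    rw [hd]
    rfl
  · rintro ⟨hlen, ht⟩
    rw [List.suffix_iff_eq_drop]
    have hld : (cs.drop (cs.length - 5)).length = 5 := by
      rw [List.length_drop]; omega
    rw [show (['.','l','o','c','k'] : List Char).length = 5 from rfl]
    rw [← ht, List.take_of_length_le (by omega)]

lemma lock_slash_iff (cs : List Char) :
    (∃ j, ['.','l','o','c','k','/'] <+: cs.drop j) ↔
      ∃ (k : Nat), ∃ _ : k < cs.length, cs[k] = '/' ∧ 5 ≤ k ∧ (cs.drop (k-5)).take 5 = ['.','l','o','c','k'] := by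
  constructor
  · rintro ⟨j, hp⟩
    have ht6 : (cs.drop j).take 6 = ['.','l','o','c','k','/'] := (List.prefix_iff_eq_take.mp hp).symm
    have hlen : 6 ≤ (cs.drop j).length := by
      have := List.IsPrefix.length_le hp
      simpa using this
    have hlen' : j + 6 ≤ cs.length := by
      rw [List.length_drop] at hlen
      omega
    refine ⟨j + 5, by omega, ?_, by omega, ?_⟩
    · have h5 : (5:Nat) < (cs.drop j).length := by omega
      have h5' : (5:Nat) < ((cs.drop j).take 6).length := by
        rw [ht6]
        simp
      have h1 : ((cs.drop j).take 6)[5]'h5' = (cs.drop j)[5]'h5 := List.getElem_take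
      have h2 : ((cs.drop j).take 6)[5]'h5' = '/' := by
        simp only [ht6]
        rfl
      have hdg : (cs.drop j)[5]'h5 = cs[j+5]'(by omega) := by
        rw [List.getElem_drop]
      rw [← hdg, ← h1, h2]
    · have hj : j + 5 - 5 = j := by omega
      have h55 : (cs.drop j).take 5 = ((cs.drop j).take 6).take 5 := by
        rw [List.take_take]
        norm_num
      rw [hj, h55, ht6]
      rfl
  · rintro ⟨k, hk, hsl, h5, ht⟩
    refine ⟨k - 5, ?_⟩
    rw [List.prefix_iff_eq_take]
    rw [show (['.','l','o','c','k','/'] : List Char).length = 6 from rfl]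
    rw [show (6:Nat) = 5 + 1 from rfl, List.take_add_one, ht]
    have hg : (cs.drop (k-5))[5]? = some '/' := by
      rw [List.getElem?_drop, show k - 5 + 5 = k by omega, List.getElem?_eq_getElem hk, hsl]
    rw [hg]
    rfl


lemma pv_guard (p : Prop) [Decidable p] (x : Bool) :
    (if p then false else x) = (!(decide p) && x) := by
  split_ifs with h <;> simp [h]

lemma infix_pair_iff (a b : Char) (cs : List Char) :
    [a, b] <:+: cs ↔ (a, b) ∈ cs.zip cs.tail := by
  induction cs with
  | nil => simp
  | cons c rest ih =>
    cases rest with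
    | nil => simp [List.infix_cons_iff, List.cons_prefix_cons]
    | cons d r =>
      rw [List.infix_cons_iff, ih]
      simp [List.prefix_cons_iff]

lemma prefix_singleton_iff (a : Char) (cs : List Char) : [a] <+: cs ↔ cs.head? = some a := by
  cases cs <;> simp [List.cons_prefix_cons, eq_comm]

lemma suffix_singleton_iff (a : Char) (cs : List Char) : [a] <:+ cs ↔ cs.getLast? = some a := by
  rw [← List.reverse_prefix, show [a].reverse = [a] from rfl, prefix_singleton_iff,
    List.head?_reverse]

lemma chars_clause_iff (cs : List Char) :
    ((∀ c ∈ cs, ¬(c.toNat < 40 ∨ c.toNat = 177)) ∧ ' ' ∉ cs ∧ '~' ∉ cs ∧ '^' ∉ cs ∧ ':' ∉ cs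
      ∧ '?' ∉ cs ∧ '*' ∉ cs ∧ '[' ∉ cs ∧ '\\' ∉ cs)
    ↔ ∀ c ∈ cs, ¬(c.toNat < 40 ∨ c.toNat = 177 ∨ c ∈ ([' ','~','^',':','?','*','[','\\'] : List Char)) := by
  constructor
  · rintro ⟨h40, h1, h2, h3, h4, h5, h6, h7, h8⟩ c hc
    have hg := h40 c hc
    simp only [List.mem_cons, List.not_mem_nil, or_false, not_or] at hg ⊢
    exact ⟨hg.1, hg.2, fun e => h1 (e ▸ hc), fun e => h2 (e ▸ hc), fun e => h3 (e ▸ hc),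
      fun e => h4 (e ▸ hc), fun e => h5 (e ▸ hc), fun e => h6 (e ▸ hc), fun e => h7 (e ▸ hc),
      fun e => h8 (e ▸ hc)⟩
  · intro hall
    refine ⟨fun c hc => ?_, fun hm => ?_, fun hm => ?_, fun hm => ?_, fun hm => ?_, fun hm => ?_,
      fun hm => ?_, fun hm => ?_, fun hm => ?_⟩
    · have := hall c hc
      tauto
    all_goals exact (hall _ hm) (by simp)

lemma split_clause_iff (cs : List Char) :
    (∀ comp ∈ PySem.Chars.splitOn cs ['/'], ¬(['.'] <+: comp ∨ ['.','l','o','c','k'] <:+ comp)) ↔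
    (cs.head? ≠ some '.' ∧ ('/','.') ∉ cs.zip cs.tail
      ∧ ¬(∃ j, ['.','l','o','c','k','/'] <+: cs.drop j) ∧ ¬(['.','l','o','c','k'] <:+ cs)) := by
  rw [splitOn_eq_pvSplit]
  have h1 := pvSplit_startswith_dot cs
  have h2 := pvSplit_endswith ['.','l','o','c','k'] (by simp) (by decide) cs
  constructor
  · intro H
    refine ⟨fun hh => ?_, fun hz => ?_, fun he => ?_, fun hsfx => ?_⟩
    · obtain ⟨comp, hc, hp⟩ := h1.mpr (Or.inl hh)
      exact H comp hc (Or.inl hp)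
    · obtain ⟨comp, hc, hp⟩ := h1.mpr (Or.inr hz)
      exact H comp hc (Or.inl hp)
    · obtain ⟨comp, hc, hp⟩ := h2.mpr (Or.inl he)
      exact H comp hc (Or.inr hp)
    · obtain ⟨comp, hc, hp⟩ := h2.mpr (Or.inr hsfx)
      exact H comp hc (Or.inr hp)
  · rintro ⟨hh, hz, he, hsfx⟩ comp hc hor
    rcases hor with hp | hp
    · rcases h1.mp ⟨comp, hc, hp⟩ with hx | hx
      · exact hh hx
      · exact hz hx
    · rcases h2.mp ⟨comp, hc, hp⟩ with hx | hx
      · exact he hx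
      · exact hsfx hx

lemma lock_getLast (cs : List Char) (h : ['.','l','o','c','k'] <:+ cs) :
    cs.getLast? = some 'k' := by
  obtain ⟨r, rfl⟩ := h
  simp

lemma lemA (s : String) (h : s.toList ≠ []) :
    is_valid_git_refname_py s = true ↔ pvC s.toList := by
  simp only [is_valid_git_refname_py]
  rw [PySem.List.foldl_append_if, PySem.List.foldl_append_if]
  simp only [pv_guard, Bool.and_eq_true, Bool.not_eq_true', decide_eq_false_iff_not]
  simp only [List.nil_append, List.length_map, ne_eq, not_not, List.length_eq_zero_iff,
    List.filter_eq_nil_iff, PySem.Chars.isIn_iff_infix, List.singleton_infix_iff, infix_pair_iff,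
    PySem.Chars.startswith_iff, PySem.Chars.endswith_iff, prefix_singleton_iff,
    suffix_singleton_iff, Bool.or_eq_true, decide_eq_true_eq, beq_iff_eq, PySem.Chars.len_eq,
    not_or, and_true, Nat.cast_eq_zero]
  have hs := split_clause_iff s.toList
  have hch := chars_clause_iff s.toList
  simp only [not_or, prefix_singleton_iff] at hs
  simp only [not_or] at hch
  unfold pvC
  simp only [not_or]
  tauto

lemma lemB (s : String) (h : s.toList ≠ []) :
    is_valid_git_refname_py_alt s = true ↔ pvC s.toList := by
  have hlen : s.toList.length ≠ 0 := by simpa using h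
  have h0 : 0 < s.toList.length := by omega
  have hhead : s.toList.head? = some (s.toList[0]'h0) := by
    rw [List.head?_eq_getElem?, List.getElem?_eq_getElem h0]
  have hlast : s.toList.getLast? = some (s.toList[s.toList.length - 1]'(by omega)) := by
    rw [List.getLast?_eq_getElem?, List.getElem?_eq_getElem (by omega)]
  simp only [is_valid_git_refname_py_alt, PySem.Chars.len_eq]
  rw [if_neg (by exact_mod_cast hlen), PySem.List.pyRange_zero_natCast, List.all_map]
  simp only [List.all_eq_true, List.mem_range, Function.comp]
  constructor
  · intro H
    have H' : ∀ (k : Nat) (hk : k < s.toList.length),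
        _ := fun k hk => (checkAt_iff s.toList k hk).mp (H k hk)
    refine ⟨?_, ?_, ?_, ?_, ?_, ?_, ?_, ?_, ?_, ?_, ?_⟩
    · exact List.forall_mem_iff_forall_getElem.mpr fun k hk => (H' k hk).1
    · intro he
      rw [hhead] at he
      exact (H' 0 h0).2.1 rfl (Or.inl (Option.some_inj.mp he))
    · intro he
      rw [hhead] at he
      exact (H' 0 h0).2.1 rfl (Or.inr (Option.some_inj.mp he))
    · intro he
      rw [hlast] at he
      exact (H' (s.toList.length - 1) (by omega)).2.2.2.1 rfl (Or.inl (Option.some_inj.mp he))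
    · intro he
      rw [hlast] at he
      exact (H' (s.toList.length - 1) (by omega)).2.2.2.1 rfl (Or.inr (Option.some_inj.mp he))
    · intro hm
      obtain ⟨k, hk1, ha, hb⟩ := (zip_tail_mem_iff _ _ _).mp hm
      refine (H' (k+1) (by omega)).2.2.1 (by omega) (Or.inl ?_)
      rw [show k + 1 - 1 = k from by omega, take_two_window s.toList k hk1, ha, hb]
    · intro hm
      obtain ⟨k, hk1, ha, hb⟩ := (zip_tail_mem_iff _ _ _).mp hm
      refine (H' (k+1) (by omega)).2.2.1 (by omega) (Or.inr (Or.inl ?_))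
      rw [show k + 1 - 1 = k from by omega, take_two_window s.toList k hk1, ha, hb]
    · intro hm
      obtain ⟨k, hk1, ha, hb⟩ := (zip_tail_mem_iff _ _ _).mp hm
      refine (H' (k+1) (by omega)).2.2.1 (by omega) (Or.inr (Or.inr (Or.inl ?_)))
      rw [show k + 1 - 1 = k from by omega, take_two_window s.toList k hk1, ha, hb]
    · intro hm
      obtain ⟨k, hk1, ha, hb⟩ := (zip_tail_mem_iff _ _ _).mp hm
      refine (H' (k+1) (by omega)).2.2.1 (by omega) (Or.inr (Or.inr (Or.inr ?_)))
      rw [show k + 1 - 1 = k from by omega, take_two_window s.toList k hk1, ha, hb]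
    · intro he
      obtain ⟨k, hk, hsl, h5, ht⟩ := (lock_slash_iff s.toList).mp he
      exact (H' k hk).2.2.2.2.1 hsl ⟨h5, ht⟩
    · intro hsfx
      have hlk := (lock_suffix_iff s.toList).mp hsfx
      have hlg := lock_getLast s.toList hsfx
      rw [hlast] at hlg
      have hkc : s.toList[s.toList.length - 1]'(by omega) = 'k' := Option.some_inj.mp hlg
      refine (H' (s.toList.length - 1) (by omega)).2.2.2.2.2 ?_ rfl hlk
      rw [hkc]
      decide
  · rintro ⟨hch, hd1, hd2, hl1, hl2, hp1, hp2, hp3, hp4, hk1, hk2⟩ k hk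
    rw [checkAt_iff s.toList k hk]
    refine ⟨List.forall_mem_iff_forall_getElem.mp hch k hk, ?_, ?_, ?_, ?_, ?_⟩
    · rintro rfl hor
      rcases hor with he | he
      · exact hd1 (by rw [hhead, he])
      · exact hd2 (by rw [hhead, he])
    · intro h1 hor
      have htw := take_two_window s.toList (k-1) (by omega)
      simp only [Nat.sub_add_cancel h1] at htw
      rw [htw] at hor
      rcases hor with ht | ht | ht | ht
      all_goals (
        have hab := List.cons.injEq _ _ _ _ ▸ ht
        have hA := hab.1
        have hB := (List.cons.injEq _ _ _ _ ▸ hab.2).1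
        first
          | exact hp1 ((zip_tail_mem_iff _ _ _).mpr ⟨k-1, by omega, hA, by simp only [Nat.sub_add_cancel h1]; exact hB⟩)
          | exact hp2 ((zip_tail_mem_iff _ _ _).mpr ⟨k-1, by omega, hA, by simp only [Nat.sub_add_cancel h1]; exact hB⟩)
          | exact hp3 ((zip_tail_mem_iff _ _ _).mpr ⟨k-1, by omega, hA, by simp only [Nat.sub_add_cancel h1]; exact hB⟩)
          | exact hp4 ((zip_tail_mem_iff _ _ _).mpr ⟨k-1, by omega, hA, by simp only [Nat.sub_add_cancel h1]; exact hB⟩))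
    · intro hkl hor
      subst hkl
      rcases hor with he | he
      · exact hl1 (by rw [hlast, he])
      · exact hl2 (by rw [hlast, he])
    · rintro hsl ⟨h5, ht⟩
      exact hk1 ((lock_slash_iff s.toList).mpr ⟨k, hk, hsl, h5, ht⟩)
    · rintro hne hkl ⟨h5, ht⟩
      exact hk2 ((lock_suffix_iff s.toList).mpr ⟨h5, ht⟩)

-- ===== VERDICT (by name: the statement is the Claim_ definition above) =====
theorem is_valid_git_refname_py_spec : Claim_equal_is_valid_git_refname_py := by
  intro s _
  unfold Spec_is_valid_git_refname_py
  by_cases h : s.toList = []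
  · simp [is_valid_git_refname_py, is_valid_git_refname_py_alt, h]
  · rw [Bool.eq_iff_iff, lemA s h, lemB s h]
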